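-- pv_equiv track=rewrite | github.com/austral-prog/tp-7-facuhenest | tp-7-facuhenest-main/loops_and_print.py | enumerate_list
-- ===== SOURCE A (Python) =====
-- def enumerate_list(lista):
--     lista_enumerada = []
--     counter = 0
--     for indice, valor in enumerate(lista):
--         if valor:
--             lista_enumerada.append(f"{counter}. {valor.title()}")
--             counter +=1
--     return lista_enumerada
-- ===== SOURCE B (Python) =====
-- def enumerate_list(lista):
--     # Back-to-front: count the truthy items once, then walk the list in
--     # REVERSE assigning each truthy item its index by counting down, and
--     # finally reverse the built output.
--     k = sum(1 for v in lista if v)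
--     out = []
--     for v in reversed(lista):
--         if v:
--             k -= 1
--             out.append(f"{k}. {v.title()}")
--     out.reverse()
--     return out
-- ===== Notes on version B (the rewrite author's own statement) =====
-- stated objective: alternative
-- what changed: Builds the output back-to-front: one pass counts the truthy items, then a reverse traversal assigns indices by counting down from that total and the result list is reversed at the end, instead of A's forward loop with an incrementing counter.
import Mathlib
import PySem

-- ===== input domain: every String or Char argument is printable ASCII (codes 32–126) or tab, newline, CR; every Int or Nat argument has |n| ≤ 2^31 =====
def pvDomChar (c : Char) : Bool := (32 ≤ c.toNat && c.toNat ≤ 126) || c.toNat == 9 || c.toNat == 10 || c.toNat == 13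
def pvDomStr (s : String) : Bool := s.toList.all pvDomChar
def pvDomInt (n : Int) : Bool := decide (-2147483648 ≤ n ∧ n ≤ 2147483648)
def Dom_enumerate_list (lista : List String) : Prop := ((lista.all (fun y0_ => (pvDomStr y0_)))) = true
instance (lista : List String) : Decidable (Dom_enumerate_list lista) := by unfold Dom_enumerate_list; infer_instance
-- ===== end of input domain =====

-- B builds the output back-to-front (count truthy once, reverse traversal counting down,
-- reverse the result) instead of A's forward loop with an incrementing counter.

-- ===== PORT A =====
-- str.title, hand-ported: exact on the ASCII domain (Dom), where Python's "cased" = isalpha.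
def pyTitleChars : Bool → List Char → List Char
  | _, [] => []
  | prev, c :: cs =>
      (if PySem.Chars.isalpha c then
         (if prev then PySem.Chars.lowerChar c else PySem.Chars.upperChar c)
       else c) :: pyTitleChars (PySem.Chars.isalpha c) cs

def pyTitle (s : String) : String := String.ofList (pyTitleChars false s.toList)

def enumerate_list (lista : List String) : List String :=
  (((PySem.List.enumerate lista 0).foldl
      (fun (st : List String × Int) iv =>
        if iv.2 ≠ "" then
          (st.1 ++ [PySem.Int.toStr st.2 ++ ". " ++ pyTitle iv.2], st.2 + 1)
        else st)
      ([], 0))).1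

-- ===== PORT B =====
def enumerate_list_alt (lista : List String) : List String :=
  let k : Int := lista.foldl (fun a v => if v ≠ "" then a + 1 else a) 0
  let st := lista.reverse.foldl
      (fun (st : Int × List String) v =>
        if v ≠ "" then
          (st.1 - 1, st.2 ++ [PySem.Int.toStr (st.1 - 1) ++ ". " ++ pyTitle v])
        else st)
      (k, [])
  st.2.reverse

-- ===== PRECONDITION & SPEC =====
def Spec_enumerate_list (lista : List String) (out : List String) : Prop := out = enumerate_list_alt lista
instance (lista : List String) (out : List String) : Decidable (Spec_enumerate_list lista out) := by unfold Spec_enumerate_list; infer_instance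

-- ===== CLAIM (what is proved, stated in full; the proofs are below) =====
def Claim_equal_enumerate_list : Prop := ∀ (lista : List String), Dom_enumerate_list lista → Spec_enumerate_list lista (enumerate_list lista)

-- ===== LEMMAS AND PROOFS =====

-- canonical form: A's fold = map over enumerate of the filtered list
theorem pv_fold_eq (lista : List String) :
    ∀ (acc : List String) (c k : Int),
      ((PySem.List.enumerate lista k).foldl
        (fun (st : List String × Int) iv =>
          if iv.2 ≠ "" then
            (st.1 ++ [PySem.Int.toStr st.2 ++ ". " ++ pyTitle iv.2], st.2 + 1)
          else st)
        (acc, c)).1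
      = acc ++ (PySem.List.enumerate (lista.filter (fun v => v ≠ "")) c).map
          (fun iv => PySem.Int.toStr iv.1 ++ ". " ++ pyTitle iv.2) := by
  induction lista with
  | nil => intro acc c k; simp [PySem.List.enumerate_nil]
  | cons v rest ih =>
      intro acc c k
      by_cases hv : v = ""
      · simpa [PySem.List.enumerate_cons, List.filter_cons, hv] using ih acc c (k + 1)
      · simpa [PySem.List.enumerate_cons, List.filter_cons, hv] using
          ih (acc ++ [PySem.Int.toStr c ++ ". " ++ pyTitle v]) (c + 1) (k + 1)

-- B's first pass counts the truthy elements
theorem pv_count_eq (lista : List String) :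
    ∀ (c : Int),
      lista.foldl (fun a v => if v ≠ "" then a + 1 else a) c
        = c + ((lista.filter (fun v => v ≠ "")).length : Int) := by
  induction lista with
  | nil => intro c; simp
  | cons v rest ih =>
      intro c
      rw [List.foldl_cons]
      by_cases hv : v = ""
      · rw [if_neg (fun h => h hv), ih c]
        simp [hv]
      · rw [if_pos hv, ih (c + 1)]
        simp [hv]
        ring

-- B's reverse fold builds the reversed canonical form, counting the index down
theorem pv_rev_fold_eq (ys : List String) :
    ∀ (c : Int) (acc : List String),
      ys.foldl
        (fun (st : Int × List String) v =>
          if v ≠ "" then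
            (st.1 - 1, st.2 ++ [PySem.Int.toStr (st.1 - 1) ++ ". " ++ pyTitle v])
          else st)
        (c, acc)
      = (c - ((ys.filter (fun v => v ≠ "")).length : Int),
         acc ++ ((PySem.List.enumerate ((ys.filter (fun v => v ≠ "")).reverse)
              (c - ((ys.filter (fun v => v ≠ "")).length : Int))).map
            (fun iv => PySem.Int.toStr iv.1 ++ ". " ++ pyTitle iv.2)).reverse) := by
  induction ys with
  | nil => intro c acc; simp [PySem.List.enumerate_nil]
  | cons v rest ih =>
      intro c acc
      rw [List.foldl_cons]
      by_cases hv : v = ""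
      · rw [if_neg (fun h => h hv), ih c acc]
        simp [hv]
      · rw [if_pos hv, ih (c - 1) (acc ++ [PySem.Int.toStr (c - 1) ++ ". " ++ pyTitle v])]
        have hF : (v :: rest).filter (fun v => v ≠ "") = v :: rest.filter (fun v => v ≠ "") := by
          simp [hv]
        rw [hF]
        simp only [List.reverse_cons, PySem.List.enumerate_append, List.map_append,
          List.reverse_append, List.length_reverse, List.length_cons,
          PySem.List.enumerate_cons, PySem.List.enumerate_nil, List.map_cons, List.map_nil,
          List.reverse_cons, List.reverse_nil, List.nil_append, List.append_assoc,
          List.cons_append]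
        push_cast
        ring_nf

-- ===== VERDICT (by name: the statement is the Claim_ definition above) =====
theorem enumerate_list_spec : Claim_equal_enumerate_list := by
  intro lista _
  unfold Spec_enumerate_list enumerate_list enumerate_list_alt
  dsimp only
  rw [pv_fold_eq lista [] 0 0, pv_count_eq lista 0, pv_rev_fold_eq lista.reverse _ []]
  simp [List.filter_reverse]
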